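-- pv_equiv track=rewrite | github.com/wahaibisraa/Problem-of-the-day- | Day 12.py | alternate_positive_negative
-- ===== SOURCE A (Python) =====
-- def alternate_positive_negative(arr):
--     pos = [x for x in arr if x > 0]
--     neg = [x for x in arr if x < 0]
--
--     result = []
--     i, j = 0, 0
--     while i < len(pos) and j < len(neg):
--         result.append(pos[i])
--         result.append(neg[j])
--         i += 1
--         j += 1
--
--     while i < len(pos):
--         result.append(pos[i])
--         i += 1
--
--     while j < len(neg):
--         result.append(neg[j])
--         j += 1
--
--     return result
-- ===== SOURCE B (Python) =====
-- def alternate_positive_negative(arr):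
--     # Direct-placement algorithm: count positives/negatives, preallocate the
--     # output, then one pass over arr writes each element straight to its final
--     # slot (k-th positive -> 2k while interleaving, then m+k; k-th negative ->
--     # 2k+1, then P+k). No pos/neg lists, no interleave loop, no tail loops.
--     P = sum(1 for x in arr if x > 0)
--     N = sum(1 for x in arr if x < 0)
--     m = min(P, N)
--     result = [0] * (P + N)
--     i = j = 0
--     for x in arr:
--         if x > 0:
--             result[2 * i if i < m else m + i] = x
--             i += 1
--         elif x < 0:
--             result[2 * j + 1 if j < m else P + j] = x
--             j += 1
--     return result
-- ===== Notes on version B (the rewrite author's own statement) =====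
-- stated objective: alternative
-- what changed: Instead of building pos/neg lists and interleaving them with three loops, B counts signs, preallocates the output, and in one pass writes each element directly to its final index computed arithmetically (k-th positive to 2k or m+k, k-th negative to 2k+1 or P+k).
import Mathlib
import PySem

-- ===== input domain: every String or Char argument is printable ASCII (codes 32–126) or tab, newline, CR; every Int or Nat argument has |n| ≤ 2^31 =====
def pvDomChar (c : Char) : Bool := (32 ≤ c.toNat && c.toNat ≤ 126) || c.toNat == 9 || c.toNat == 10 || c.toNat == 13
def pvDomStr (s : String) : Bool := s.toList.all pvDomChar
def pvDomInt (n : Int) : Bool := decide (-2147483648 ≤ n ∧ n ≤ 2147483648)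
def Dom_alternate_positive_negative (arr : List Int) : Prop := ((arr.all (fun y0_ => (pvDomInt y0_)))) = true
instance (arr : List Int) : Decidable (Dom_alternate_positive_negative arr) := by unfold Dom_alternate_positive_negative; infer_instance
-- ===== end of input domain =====

-- B replaces A's filter-then-interleave (three loops over pos/neg lists) by counting signs,
-- preallocating the output and writing each element directly to its final index in one pass
-- (objective: alternative algorithm, same asymptotic cost).

-- ===== PORT A =====
-- A's first while runs while both indices are in range, appending pos[i] then neg[j] and
-- advancing both; modelled by simultaneous recursion on the unread suffixes of pos and neg.
-- The two trailing whiles append the remaining suffix of pos, then of neg.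
def pvLoopA : List Int → List Int → List Int → List Int
  | result, p :: ps, n :: ns => pvLoopA (result ++ [p, n]) ps ns
  | result, ps, ns => (result ++ ps) ++ ns

def alternate_positive_negative (arr : List Int) : List Int :=
  let pos := arr.filter (fun x => x > 0)
  let neg := arr.filter (fun x => x < 0)
  pvLoopA [] pos neg

-- ===== PORT B =====
-- Faithful to Source B: P/N are counts, result starts as [0]*(P+N), and the single foldl over arr
-- performs the indexed assignments result[...] = x (every index written is in range, as proved
-- below, so List.set matches Python's list assignment here).
def alternate_positive_negative_alt (arr : List Int) : List Int :=
  let P := arr.countP (fun x => decide (x > 0))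
  let N := arr.countP (fun x => decide (x < 0))
  let m := min P N
  (arr.foldl (fun (st : List Int × Nat × Nat) x =>
      if x > 0 then
        (st.1.set (if st.2.1 < m then 2 * st.2.1 else m + st.2.1) x, st.2.1 + 1, st.2.2)
      else if x < 0 then
        (st.1.set (if st.2.2 < m then 2 * st.2.2 + 1 else P + st.2.2) x, st.2.1, st.2.2 + 1)
      else st)
    (List.replicate (P + N) 0, 0, 0)).1

-- ===== PRECONDITION & SPEC =====
def Spec_alternate_positive_negative (arr : List Int) (out : List Int) : Prop := out = alternate_positive_negative_alt arr
instance (arr : List Int) (out : List Int) : Decidable (Spec_alternate_positive_negative arr out) := by unfold Spec_alternate_positive_negative; infer_instance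

-- ===== CLAIM (what is proved, stated in full; the proofs are below) =====
def Claim_equal_alternate_positive_negative : Prop := ∀ (arr : List Int), Dom_alternate_positive_negative arr → Spec_alternate_positive_negative arr (alternate_positive_negative arr)

-- ===== LEMMAS AND PROOFS =====

-- output slot of the a-th positive / b-th negative
def pvIdxP (m a : Nat) : Nat := if a < m then 2 * a else m + a
def pvIdxN (m P b : Nat) : Nat := if b < m then 2 * b + 1 else P + b

-- the sequence of assignments B performs for the positives (resp. negatives)
def pvPlaceP (m : Nat) : List Int → Nat → List Int → List Int
  | [], _, r => r
  | x :: xs, i, r => pvPlaceP m xs (i + 1) (r.set (pvIdxP m i) x)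

def pvPlaceN (m P : Nat) : List Int → Nat → List Int → List Int
  | [], _, r => r
  | x :: xs, j, r => pvPlaceN m P xs (j + 1) (r.set (pvIdxN m P j) x)

theorem pvIdxP_mono (m : Nat) {a a' : Nat} (h : a < a') : pvIdxP m a < pvIdxP m a' := by
  unfold pvIdxP; split_ifs <;> omega

theorem pvIdxN_mono (m P : Nat) (hmP : m ≤ P) {b b' : Nat} (h : b < b') : pvIdxN m P b < pvIdxN m P b' := by
  unfold pvIdxN; split_ifs <;> omega

theorem pvIdx_ne {P N a b : Nat} (ha : a < P) (hb : b < N) :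
    pvIdxP (min P N) a ≠ pvIdxN (min P N) P b := by
  unfold pvIdxP pvIdxN; split_ifs <;> omega

theorem pvIdxP_lt {P N a : Nat} (ha : a < P) : pvIdxP (min P N) a < P + N := by
  unfold pvIdxP; split_ifs <;> omega

theorem pvIdxN_lt {P N b : Nat} (_hb : b < N) : pvIdxN (min P N) P b < P + N := by
  unfold pvIdxN; split_ifs <;> omega

theorem pvPlaceP_length (m : Nat) (xs : List Int) : ∀ i r, (pvPlaceP m xs i r).length = r.length := by
  induction xs with
  | nil => intro i r; rfl
  | cons x xs ih => intro i r; simp [pvPlaceP, ih]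

theorem pvPlaceN_length (m P : Nat) (xs : List Int) : ∀ j r, (pvPlaceN m P xs j r).length = r.length := by
  induction xs with
  | nil => intro j r; rfl
  | cons x xs ih => intro j r; simp [pvPlaceN, ih]

theorem pvPlaceP_set (m : Nat) (xs : List Int) : ∀ i r k x,
    (∀ a, a < xs.length → pvIdxP m (i + a) ≠ k) →
    pvPlaceP m xs i (r.set k x) = (pvPlaceP m xs i r).set k x := by
  induction xs with
  | nil => intro i r k x _; rfl
  | cons y xs ih =>
    intro i r k x h
    have h0 : pvIdxP m i ≠ k := by have := h 0 (by simp); simpa using this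
    simp only [pvPlaceP]
    rw [List.set_comm _ _ (Ne.symm h0), ih]
    intro a ha
    have h2 := h (a + 1) (by simp; omega)
    have he : i + 1 + a = i + (a + 1) := by omega
    rw [he]; exact h2

theorem pvPlaceP_get?_miss (m : Nat) (xs : List Int) : ∀ i r k,
    (∀ a, a < xs.length → pvIdxP m (i + a) ≠ k) →
    (pvPlaceP m xs i r)[k]? = r[k]? := by
  induction xs with
  | nil => intro i r k _; rfl
  | cons y xs ih =>
    intro i r k h
    have h0 : pvIdxP m i ≠ k := by have := h 0 (by simp); simpa using this
    simp only [pvPlaceP]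
    rw [ih _ _ _ (fun a ha => by
          have h2 := h (a + 1) (by simp; omega)
          have he : i + 1 + a = i + (a + 1) := by omega
          rw [he]; exact h2)]
    exact List.getElem?_set_ne h0

theorem pvPlaceN_get?_miss (m P : Nat) (xs : List Int) : ∀ j r k,
    (∀ b, b < xs.length → pvIdxN m P (j + b) ≠ k) →
    (pvPlaceN m P xs j r)[k]? = r[k]? := by
  induction xs with
  | nil => intro j r k _; rfl
  | cons y xs ih =>
    intro j r k h
    have h0 : pvIdxN m P j ≠ k := by have := h 0 (by simp); simpa using this
    simp only [pvPlaceN]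
    rw [ih _ _ _ (fun b hb => by
          have h2 := h (b + 1) (by simp; omega)
          have he : j + 1 + b = j + (b + 1) := by omega
          rw [he]; exact h2)]
    exact List.getElem?_set_ne h0

theorem pvPlaceP_get?_hit (m : Nat) (xs : List Int) : ∀ i r a,
    a < xs.length → pvIdxP m (i + a) < r.length →
    (pvPlaceP m xs i r)[pvIdxP m (i + a)]? = xs[a]? := by
  induction xs with
  | nil => intro i r a ha; simp at ha
  | cons y xs ih =>
    intro i r a ha hlt
    cases a with
    | zero =>
      simp only [pvPlaceP]
      rw [pvPlaceP_get?_miss]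
      · simp only [Nat.add_zero] at hlt ⊢
        rw [List.getElem?_set_self hlt]; rfl
      · intro a' _
        simp only [Nat.add_zero]
        have := pvIdxP_mono m (a := i) (a' := i + 1 + a') (by omega)
        omega
    | succ a' =>
      simp only [pvPlaceP]
      have : i + (a' + 1) = (i + 1) + a' := by omega
      rw [this]
      rw [ih (i + 1) _ a' (by simp at ha; omega) (by simpa [← this] using hlt)]
      rfl

theorem pvPlaceN_get?_hit (m P : Nat) (hmP : m ≤ P) (xs : List Int) : ∀ j r b,
    b < xs.length → pvIdxN m P (j + b) < r.length →
    (pvPlaceN m P xs j r)[pvIdxN m P (j + b)]? = xs[b]? := by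
  induction xs with
  | nil => intro j r b hb; simp at hb
  | cons y xs ih =>
    intro j r b hb hlt
    cases b with
    | zero =>
      simp only [pvPlaceN]
      rw [pvPlaceN_get?_miss]
      · simp only [Nat.add_zero] at hlt ⊢
        rw [List.getElem?_set_self hlt]; rfl
      · intro b' _
        simp only [Nat.add_zero]
        have := pvIdxN_mono m P hmP (b := j) (b' := j + 1 + b') (by omega)
        omega
    | succ b' =>
      simp only [pvPlaceN]
      have : j + (b' + 1) = (j + 1) + b' := by omega
      rw [this]
      rw [ih (j + 1) _ b' (by simp at hb; omega) (by simpa [← this] using hlt)]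
      rfl

-- B's fold decomposes into the positive placements followed by the negative placements.
theorem pvFold_place (m P N : Nat) (s : List Int) : ∀ (r : List Int) (i j : Nat),
    i + (s.filter (fun x => decide (x > 0))).length ≤ P →
    j + (s.filter (fun x => decide (x < 0))).length ≤ N →
    m = min P N →
    (s.foldl (fun (st : List Int × Nat × Nat) x =>
      if x > 0 then
        (st.1.set (if st.2.1 < m then 2 * st.2.1 else m + st.2.1) x, st.2.1 + 1, st.2.2)
      else if x < 0 then
        (st.1.set (if st.2.2 < m then 2 * st.2.2 + 1 else P + st.2.2) x, st.2.1, st.2.2 + 1)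
      else st) (r, i, j)).1
    = pvPlaceN m P (s.filter (fun x => decide (x < 0))) j
        (pvPlaceP m (s.filter (fun x => decide (x > 0))) i r) := by
  induction s with
  | nil => intro r i j _ _ _; rfl
  | cons x s ih =>
    intro r i j hi hj hm
    by_cases hp : x > 0
    · have hn : ¬ x < 0 := by omega
      have hps : (x :: s).filter (fun y => decide (y > 0)) = x :: s.filter (fun y => decide (y > 0)) := by
        simp [hp]
      have hns : (x :: s).filter (fun y => decide (y < 0)) = s.filter (fun y => decide (y < 0)) := by
        simp [hn]
      rw [hps] at hi; rw [hns] at hj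
      simp only [List.foldl_cons, hps, hns, if_pos hp]
      rw [ih _ _ _ (by simp at hi ⊢; omega) hj hm]
      rfl
    · by_cases hn : x < 0
      · have hps : (x :: s).filter (fun y => decide (y > 0)) = s.filter (fun y => decide (y > 0)) := by
          simp [hp]
        have hns : (x :: s).filter (fun y => decide (y < 0)) = x :: s.filter (fun y => decide (y < 0)) := by
          simp [hn]
        rw [hps] at hi; rw [hns] at hj
        simp only [List.foldl_cons, hps, hns, if_neg hp, if_pos hn]
        rw [ih _ _ _ hi (by simp at hj ⊢; omega) hm]
        show pvPlaceN m P (s.filter (fun y => decide (y < 0))) (j + 1)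
            (pvPlaceP m (s.filter (fun y => decide (y > 0))) i (r.set (pvIdxN m P j) x)) = _
        rw [pvPlaceP_set m _ i r (pvIdxN m P j) x (fun a ha => by
          subst hm
          simp only [List.length_cons] at hj
          exact pvIdx_ne (by omega) (by omega))]
        rfl
      · have hps : (x :: s).filter (fun y => decide (y > 0)) = s.filter (fun y => decide (y > 0)) := by
          simp [hp]
        have hns : (x :: s).filter (fun y => decide (y < 0)) = s.filter (fun y => decide (y < 0)) := by
          simp [hn]
        rw [hps] at hi; rw [hns] at hj
        simp only [List.foldl_cons, hps, hns, if_neg hp, if_neg hn]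
        exact ih _ _ _ hi hj hm

-- A-side characterisation -----------------------------------------------------

theorem pvLoopA_acc (ps : List Int) : ∀ ns r, pvLoopA r ps ns = r ++ pvLoopA [] ps ns := by
  induction ps with
  | nil => intro ns r; simp [pvLoopA]
  | cons p ps ih =>
    intro ns r
    cases ns with
    | nil => simp [pvLoopA]
    | cons n ns =>
      rw [pvLoopA, pvLoopA, ih, ih ns ([] ++ [p, n])]
      simp

theorem pvLoopA_length (ps : List Int) : ∀ ns, (pvLoopA [] ps ns).length = ps.length + ns.length := by
  induction ps with
  | nil => intro ns; simp [pvLoopA]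
  | cons p ps ih =>
    intro ns
    cases ns with
    | nil => simp [pvLoopA]
    | cons n ns =>
      rw [pvLoopA, pvLoopA_acc]
      simp [ih ns]; omega

theorem pvLoopA_hit_pos (ps : List Int) : ∀ ns a, a < ps.length →
    (pvLoopA [] ps ns)[pvIdxP (min ps.length ns.length) a]? = ps[a]? := by
  induction ps with
  | nil => intro ns a ha; simp at ha
  | cons p ps ih =>
    intro ns a ha
    cases ns with
    | nil =>
      simp only [pvLoopA, List.length_nil, Nat.min_zero, pvIdxP]
      simp
    | cons n ns =>
      rw [pvLoopA, pvLoopA_acc]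
      cases a with
      | zero =>
        have : pvIdxP (min (p :: ps).length (n :: ns).length) 0 = 0 := by
          simp [pvIdxP]
        rw [this]; simp
      | succ a' =>
        have hidx : pvIdxP (min (p :: ps).length (n :: ns).length) (a' + 1)
            = 2 + pvIdxP (min ps.length ns.length) a' := by
          simp only [pvIdxP, List.length_cons]
          split_ifs <;> omega
        rw [hidx]
        have : ([p, n] ++ pvLoopA [] ps ns)[2 + pvIdxP (min ps.length ns.length) a']?
            = (pvLoopA [] ps ns)[pvIdxP (min ps.length ns.length) a']? := by
          rw [List.getElem?_append_right (by simp)]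
          simp [Nat.add_comm]
        simp only [List.cons_append, List.nil_append] at this ⊢
        rw [this, ih ns a' (by simpa using ha)]
        rfl

theorem pvLoopA_hit_neg (ps : List Int) : ∀ ns b, b < ns.length →
    (pvLoopA [] ps ns)[pvIdxN (min ps.length ns.length) ps.length b]? = ns[b]? := by
  induction ps with
  | nil =>
    intro ns b hb
    cases ns with
    | nil => simp at hb
    | cons n ns =>
      simp only [pvLoopA, List.length_nil, Nat.zero_min, pvIdxN]
      simp
  | cons p ps ih =>
    intro ns b hb
    cases ns with
    | nil => simp at hb
    | cons n ns =>
      rw [pvLoopA, pvLoopA_acc]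
      cases b with
      | zero =>
        have : pvIdxN (min (p :: ps).length (n :: ns).length) (p :: ps).length 0 = 1 := by
          simp [pvIdxN]
        rw [this]; simp
      | succ b' =>
        have hidx : pvIdxN (min (p :: ps).length (n :: ns).length) (p :: ps).length (b' + 1)
            = 2 + pvIdxN (min ps.length ns.length) ps.length b' := by
          simp only [pvIdxN, List.length_cons]
          split_ifs <;> omega
        rw [hidx]
        have : ([p, n] ++ pvLoopA [] ps ns)[2 + pvIdxN (min ps.length ns.length) ps.length b']?
            = (pvLoopA [] ps ns)[pvIdxN (min ps.length ns.length) ps.length b']? := by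
          rw [List.getElem?_append_right (by simp)]
          simp [Nat.add_comm]
        simp only [List.cons_append, List.nil_append] at this ⊢
        rw [this, ih ns b' (by simpa using hb)]
        rfl

-- every output index is the slot of some positive or some negative
theorem pvIdx_surj (P N k : Nat) (hk : k < P + N) :
    (∃ a, a < P ∧ pvIdxP (min P N) a = k) ∨ (∃ b, b < N ∧ pvIdxN (min P N) P b = k) := by
  by_cases h1 : k < 2 * min P N
  · by_cases h2 : k % 2 = 0
    · exact Or.inl ⟨k / 2, by omega, by unfold pvIdxP; split_ifs <;> omega⟩
    · exact Or.inr ⟨k / 2, by omega, by unfold pvIdxN; split_ifs <;> omega⟩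
  · by_cases h3 : N ≤ P
    · exact Or.inl ⟨k - min P N, by omega, by unfold pvIdxP; split_ifs <;> omega⟩
    · exact Or.inr ⟨k - P, by omega, by unfold pvIdxN; split_ifs <;> omega⟩

-- the two placement passes reconstruct A's interleaved result, index by index
theorem pvKey (ps ns : List Int) :
    pvLoopA [] ps ns =
      pvPlaceN (min ps.length ns.length) ps.length ns 0
        (pvPlaceP (min ps.length ns.length) ps 0
          (List.replicate (ps.length + ns.length) 0)) := by
  apply List.ext_getElem?
  intro k
  have hlenP := pvPlaceP_length (min ps.length ns.length) ps 0
      (List.replicate (ps.length + ns.length) (0 : Int))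
  have hlenN := pvPlaceN_length (min ps.length ns.length) ps.length ns 0
      (pvPlaceP (min ps.length ns.length) ps 0 (List.replicate (ps.length + ns.length) (0 : Int)))
  by_cases hk : k < ps.length + ns.length
  · rcases pvIdx_surj ps.length ns.length k hk with ⟨a, ha, rfl⟩ | ⟨b, hb, rfl⟩
    · rw [pvLoopA_hit_pos ps ns a ha]
      rw [pvPlaceN_get?_miss _ _ _ _ _ _
        (fun b' hb' => by
          have := pvIdx_ne (N := ns.length) ha (by omega : 0 + b' < ns.length)
          simpa using (Ne.symm this))]
      have h0 : pvIdxP (min ps.length ns.length) a = pvIdxP (min ps.length ns.length) (0 + a) := by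
        simp
      rw [h0, pvPlaceP_get?_hit _ _ _ _ a ha (by
        simp only [List.length_replicate]
        have := pvIdxP_lt (N := ns.length) ha
        simpa using this)]
    · rw [pvLoopA_hit_neg ps ns b hb]
      have h0 : pvIdxN (min ps.length ns.length) ps.length b
          = pvIdxN (min ps.length ns.length) ps.length (0 + b) := by simp
      rw [h0, pvPlaceN_get?_hit _ _ (by omega) _ _ _ b hb (by
        rw [hlenP, List.length_replicate]
        have := pvIdxN_lt (P := ps.length) hb
        simpa using this)]
  · rw [List.getElem?_eq_none, List.getElem?_eq_none]
    · rw [hlenN, hlenP, List.length_replicate]; omega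
    · rw [pvLoopA_length]; omega

-- ===== VERDICT (by name: the statement is the Claim_ definition above) =====
theorem alternate_positive_negative_spec : Claim_equal_alternate_positive_negative := by
  intro arr _
  unfold Spec_alternate_positive_negative alternate_positive_negative alternate_positive_negative_alt
  simp only [List.countP_eq_length_filter]
  rw [pvFold_place (min (arr.filter (fun x => decide (x > 0))).length
        (arr.filter (fun x => decide (x < 0))).length)
      (arr.filter (fun x => decide (x > 0))).length
      (arr.filter (fun x => decide (x < 0))).length arr _ 0 0
      (by omega) (by omega) rfl]
  exact pvKey _ _
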